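-- pv_equiv track=rewrite | github.com/aaplatform/SkillupAlgorithm2018 | src/pskim/BJAlgorithm/q1193/zigzagFraction/__init__.py | solution
-- ===== SOURCE A (Python) =====
-- def solution(n):
--     zig=x=y=1
--     idx=0
--
--     while n-1>idx:
--
--         if zig%2==1:
--             x+=1
--             y-=1
--
--             if zig<x:
--                 y+=1
--                 zig+=1
--
--         else: # zig is even
--             x-=1
--             y+=1
--
--             if zig <y:
--                 x+=1
--                 zig+=1
--         idx+=1
--     return ""+str(y)+"/"+str(x)
-- ===== SOURCE B (Python) =====
-- def solution(n):
--     m = n if n > 1 else 1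
--     # find the containing diagonal: smallest d whose triangular number reaches m
--     d = 1
--     while d * (d + 1) // 2 < m:
--         d += 1
--     pos = m - d * (d - 1) // 2   # 1-based position inside diagonal d
--     if d % 2 == 1:
--         y, x = d + 1 - pos, pos
--     else:
--         y, x = pos, d + 1 - pos
--     return str(y) + "/" + str(x)
-- ===== Notes on version B (the rewrite author's own statement) =====
-- stated objective: faster
-- what changed: Replaces the step-by-step zigzag walk over all preceding cells with a direct search for the containing diagonal (smallest one whose triangular number reaches n) followed by a closed-form position/parity computation.
import Mathlib
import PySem

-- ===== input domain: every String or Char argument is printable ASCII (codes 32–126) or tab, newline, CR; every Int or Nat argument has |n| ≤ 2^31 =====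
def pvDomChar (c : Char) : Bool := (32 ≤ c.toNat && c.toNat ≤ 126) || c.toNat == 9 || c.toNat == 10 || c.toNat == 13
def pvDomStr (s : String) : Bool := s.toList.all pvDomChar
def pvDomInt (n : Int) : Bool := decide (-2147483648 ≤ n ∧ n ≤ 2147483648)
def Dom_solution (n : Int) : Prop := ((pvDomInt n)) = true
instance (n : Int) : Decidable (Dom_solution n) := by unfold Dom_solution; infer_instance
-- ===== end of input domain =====

-- B replaces A's cell-by-cell zigzag walk by locating the containing diagonal directly
-- via triangular numbers and computing the position in closed form (objective: faster).

-- ===== PORT A =====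
-- the while loop of A, state (zig, x, y, idx); returns (y, x)
def loopA (n zig x y idx : Int) : Int × Int :=
  if n - 1 > idx then
    if PySem.Int.mod zig 2 == 1 then
      let x' := x + 1
      let y' := y - 1
      if zig < x' then loopA n (zig + 1) x' (y' + 1) (idx + 1)
      else loopA n zig x' y' (idx + 1)
    else
      let x' := x - 1
      let y' := y + 1
      if zig < y' then loopA n (zig + 1) (x' + 1) y' (idx + 1)
      else loopA n zig x' y' (idx + 1)
  else (y, x)
termination_by (n - 1 - idx).toNat
decreasing_by all_goals omega

def solution (n : Int) : String :=
  let p := loopA n 1 1 1 0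
  "" ++ PySem.Int.toStr p.1 ++ "/" ++ PySem.Int.toStr p.2

-- ===== PORT B =====
-- termination helper for the diagonal search (cited by findD's decreasing_by)
theorem findD_dec (m d : Int) (h : PySem.Int.floordiv (d * (d + 1)) 2 < m) :
    (m - (d + 1)).toNat < (m - d).toNat := by
  have h0 : (0 : Int) ≤ d * (d + 1) := by
    rcases le_or_gt 0 d with h' | h'
    · exact mul_nonneg h' (by omega)
    · have h'' : (0 : Int) ≤ (-d) * (-(d + 1)) := mul_nonneg (by omega) (by omega)
      nlinarith
  have h2 : 0 ≤ PySem.Int.floordiv (d * (d + 1)) 2 := by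
    rw [PySem.Int.floordiv_eq_ediv_of_pos (by norm_num)]
    exact Int.ediv_nonneg h0 (by norm_num)
  rcases le_or_gt d 0 with hd | hd
  · omega
  · have h3 : d ≤ PySem.Int.floordiv (d * (d + 1)) 2 := by
      rw [PySem.Int.floordiv_eq_ediv_of_pos (by norm_num)]
      rw [Int.le_ediv_iff_mul_le (by norm_num)]
      nlinarith
    omega

-- while d*(d+1)//2 < m: d += 1
def findD (m d : Int) : Int :=
  if PySem.Int.floordiv (d * (d + 1)) 2 < m then findD m (d + 1) else d
termination_by (m - d).toNat
decreasing_by exact findD_dec m d (by assumption)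

def solution_alt (n : Int) : String :=
  let m := if n > 1 then n else 1
  let d := findD m 1
  let pos := m - PySem.Int.floordiv (d * (d - 1)) 2
  let yx := if PySem.Int.mod d 2 == 1 then (d + 1 - pos, pos) else (pos, d + 1 - pos)
  PySem.Int.toStr yx.1 ++ "/" ++ PySem.Int.toStr yx.2

-- ===== PRECONDITION & SPEC =====
def Spec_solution (n : Int) (out : String) : Prop := out = solution_alt n
instance (n : Int) (out : String) : Decidable (Spec_solution n out) := by unfold Spec_solution; infer_instance

-- ===== CLAIM (what is proved, stated in full; the proofs are below) =====
def Claim_equal_solution : Prop := ∀ (n : Int), Dom_solution n → Spec_solution n (solution n)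

-- ===== LEMMAS AND PROOFS =====

-- triangular numbers
def T (d : Int) : Int := d * (d + 1) / 2

theorem two_T (d : Int) : 2 * T d = d * (d + 1) := by
  have h : (2 : Int) ∣ d * (d + 1) := (Int.even_mul_succ_self d).two_dvd
  exact Int.mul_ediv_cancel' h

theorem floordiv_T (d : Int) : PySem.Int.floordiv (d * (d + 1)) 2 = T d := by
  rw [PySem.Int.floordiv_eq_ediv_of_pos (by norm_num)]; rfl

theorem floordiv_T_pred (d : Int) : PySem.Int.floordiv (d * (d - 1)) 2 = T (d - 1) := by
  have h : d * (d - 1) = (d - 1) * ((d - 1) + 1) := by ring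
  rw [h, floordiv_T]

theorem T_succ (d : Int) : T (d + 1) = T d + (d + 1) := by
  have h1 := two_T d
  have h2 := two_T (d + 1)
  have e : (d + 1) * (d + 1 + 1) = d * (d + 1) + 2 * (d + 1) := by ring
  linarith

theorem T_pred_succ (d : Int) : T d = T (d - 1) + d := by
  have := T_succ (d - 1)
  simpa using this

theorem T_mono {a b : Int} (ha : 0 ≤ a) (hab : a ≤ b) : T a ≤ T b := by
  have h1 := two_T a
  have h2 := two_T b
  nlinarith

theorem findD_spec (m d : Int) (hd : 1 ≤ d) (h : T (d - 1) < m) :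
    1 ≤ findD m d ∧ T (findD m d - 1) < m ∧ m ≤ T (findD m d) := by
  rw [findD]
  split
  · next h' =>
    have hTd : T d < m := by rwa [floordiv_T] at h'
    exact findD_spec m (d + 1) (by omega) (by simpa using hTd)
  · next h' =>
    have hTd : m ≤ T d := by rw [floordiv_T] at h'; omega
    exact ⟨hd, h, hTd⟩
termination_by (m - d).toNat
decreasing_by exact findD_dec m d (by assumption)

theorem T_one_pred : T (1 - 1 : Int) = 0 := by decide

theorem findD_eq (m d : Int) (hd : 1 ≤ d) (h1 : T (d - 1) < m) (h2 : m ≤ T d) :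
    findD m 1 = d := by
  have h0 : T (1 - 1 : Int) < m := by
    have hge := T_mono (a := 0) (b := d - 1) le_rfl (by omega)
    rw [T_one_pred]
    have hT0 : T 0 = 0 := by decide
    omega
  obtain ⟨hr1, hr2, hr3⟩ := findD_spec m 1 le_rfl h0
  set r := findD m 1 with hr
  by_contra hne
  rcases lt_or_gt_of_ne hne with hlt | hgt
  · have : T r ≤ T (d - 1) := T_mono (by omega) (by omega)
    omega
  · have : T d ≤ T (r - 1) := T_mono (by omega) (by omega)
    omega

-- closed-form state after reaching cell m (m ≥ 1): diagonal, position in it, x, y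
def cfZ (m : Int) : Int := findD m 1
def cfP (m : Int) : Int := m - T (cfZ m - 1)
def cfX (m : Int) : Int := if cfZ m % 2 = 1 then cfP m else cfZ m + 1 - cfP m
def cfY (m : Int) : Int := if cfZ m % 2 = 1 then cfZ m + 1 - cfP m else cfP m

theorem cf_bounds (m : Int) (hm : 1 ≤ m) :
    1 ≤ cfZ m ∧ 1 ≤ cfP m ∧ cfP m ≤ cfZ m := by
  have h0 : T (1 - 1 : Int) < m := by rw [T_one_pred]; omega
  obtain ⟨h1, h2, h3⟩ := findD_spec m 1 le_rfl h0
  have hs := T_pred_succ (findD m 1)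
  simp only [cfP, cfZ]
  omega

theorem cf_step_in (m : Int) (hm : 1 ≤ m) (h : cfP m < cfZ m) :
    cfZ (m + 1) = cfZ m ∧ cfP (m + 1) = cfP m + 1 := by
  obtain ⟨h1, h2, h3⟩ := cf_bounds m hm
  have hs := T_pred_succ (cfZ m)
  have heq : findD (m + 1) 1 = cfZ m := by
    apply findD_eq (m + 1) (cfZ m) h1
    · simp only [cfP, cfZ] at *; omega
    · simp only [cfP, cfZ] at *; omega
  constructor
  · exact heq
  · simp only [cfP, cfZ] at *
    rw [heq]
    omega

theorem cf_step_end (m : Int) (hm : 1 ≤ m) (h : cfP m = cfZ m) :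
    cfZ (m + 1) = cfZ m + 1 ∧ cfP (m + 1) = 1 := by
  obtain ⟨h1, h2, h3⟩ := cf_bounds m hm
  have hs := T_succ (cfZ m)
  have hm_eq : m = T (cfZ m) := by
    have hs' := T_pred_succ (cfZ m)
    simp only [cfP, cfZ] at *; omega
  have heq : findD (m + 1) 1 = cfZ m + 1 := by
    apply findD_eq (m + 1) (cfZ m + 1) (by omega)
    · have e : (cfZ m + 1 - 1) = cfZ m := by ring
      rw [e]; omega
    · omega
  constructor
  · exact heq
  · simp only [cfP, cfZ] at *
    rw [heq]
    have e2 : findD m 1 + 1 - 1 = findD m 1 := by ring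
    rw [e2]
    omega

theorem loopA_cf (k : Nat) : ∀ (n idx m : Int), 1 ≤ m → n - 1 - idx = k →
    loopA n (cfZ m) (cfX m) (cfY m) idx = (cfY (m + k), cfX (m + k)) := by
  induction k with
  | zero =>
    intro n idx m hm hk
    rw [loopA, if_neg (by omega)]
    simp
  | succ k ih =>
    intro n idx m hm hk
    obtain ⟨h1, h2, h3⟩ := cf_bounds m hm
    have hcast : m + ((k : Int) + 1) = (m + 1) + k := by ring
    rw [loopA, if_pos (by omega)]
    push_cast
    rw [hcast]
    by_cases hpar : cfZ m % 2 = 1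
    · have hxm : cfX m = cfP m := by simp [cfX, hpar]
      have hym : cfY m = cfZ m + 1 - cfP m := by simp [cfY, hpar]
      rw [if_pos (by simp [hpar]), hxm, hym]
      by_cases hend : cfP m = cfZ m
      · obtain ⟨hz, hp⟩ := cf_step_end m hm hend
        rw [if_pos (by omega)]
        have hpar' : ¬ cfZ (m + 1) % 2 = 1 := by omega
        have hx : cfP m + 1 = cfX (m + 1) := by
          simp only [cfX, if_neg hpar']; omega
        have hy : cfZ m + 1 - cfP m - 1 + 1 = cfY (m + 1) := by
          simp only [cfY, if_neg hpar']; omega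
        rw [hx, hy, show cfZ m + 1 = cfZ (m + 1) by omega]
        exact ih n (idx + 1) (m + 1) (by omega) (by omega)
      · obtain ⟨hz, hp⟩ := cf_step_in m hm (by omega)
        rw [if_neg (by omega)]
        have hpar' : cfZ (m + 1) % 2 = 1 := by omega
        have hx : cfP m + 1 = cfX (m + 1) := by
          simp only [cfX, if_pos hpar']; omega
        have hy : cfZ m + 1 - cfP m - 1 = cfY (m + 1) := by
          simp only [cfY, if_pos hpar']; omega
        rw [hx, hy, show cfZ m = cfZ (m + 1) by omega]
        exact ih n (idx + 1) (m + 1) (by omega) (by omega)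
    · have hxm : cfX m = cfZ m + 1 - cfP m := by simp [cfX, hpar]
      have hym : cfY m = cfP m := by simp [cfY, hpar]
      rw [if_neg (by simp [hpar]), hxm, hym]
      by_cases hend : cfP m = cfZ m
      · obtain ⟨hz, hp⟩ := cf_step_end m hm hend
        rw [if_pos (by omega)]
        have hpar' : cfZ (m + 1) % 2 = 1 := by omega
        have hx : cfZ m + 1 - cfP m - 1 + 1 = cfX (m + 1) := by
          simp only [cfX, if_pos hpar']; omega
        have hy : cfP m + 1 = cfY (m + 1) := by
          simp only [cfY, if_pos hpar']; omega
        rw [hx, hy, show cfZ m + 1 = cfZ (m + 1) by omega]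
        exact ih n (idx + 1) (m + 1) (by omega) (by omega)
      · obtain ⟨hz, hp⟩ := cf_step_in m hm (by omega)
        rw [if_neg (by omega)]
        have hpar' : ¬ cfZ (m + 1) % 2 = 1 := by omega
        have hx : cfZ m + 1 - cfP m - 1 = cfX (m + 1) := by
          simp only [cfX, if_neg hpar']; omega
        have hy : cfP m + 1 = cfY (m + 1) := by
          simp only [cfY, if_neg hpar']; omega
        rw [hx, hy, show cfZ m = cfZ (m + 1) by omega]
        exact ih n (idx + 1) (m + 1) (by omega) (by omega)

theorem cf_one : cfZ 1 = 1 ∧ cfP 1 = 1 ∧ cfX 1 = 1 ∧ cfY 1 = 1 := by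
  have hz : cfZ 1 = 1 := by
    unfold cfZ
    apply findD_eq 1 1 le_rfl
    · rw [T_one_pred]; norm_num
    · decide
  have hp : cfP 1 = 1 := by
    unfold cfP
    rw [hz, T_one_pred]
    norm_num
  refine ⟨hz, hp, ?_, ?_⟩ <;> simp [cfX, cfY, hz, hp]

theorem solution_alt_cf (n : Int) :
    solution_alt n =
      PySem.Int.toStr (cfY (if n > 1 then n else 1)) ++ "/" ++ PySem.Int.toStr (cfX (if n > 1 then n else 1)) := by
  unfold solution_alt
  simp only [floordiv_T_pred, cfX, cfY, cfP, cfZ]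
  by_cases hpar : findD (if n > 1 then n else 1) 1 % 2 = 1
  · rw [if_pos (by simp [hpar]), if_pos hpar, if_pos hpar]
  · rw [if_neg (by simp [hpar]), if_neg hpar, if_neg hpar]

-- ===== VERDICT (by name: the statement is the Claim_ definition above) =====
theorem solution_spec : Claim_equal_solution := by
  unfold Claim_equal_solution
  intro n _
  unfold Spec_solution solution
  obtain ⟨hz, hp, hx, hy⟩ := cf_one
  rw [solution_alt_cf]
  by_cases hn : n > 1
  · have hloop := loopA_cf (n - 1).toNat n 0 1 le_rfl (by omega)
    rw [hz, hx, hy] at hloop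
    have he : (1 : Int) + ((n - 1).toNat : Int) = n := by omega
    rw [he] at hloop
    rw [if_pos hn]
    simp only [hloop]
    rfl
  · have hA : loopA n 1 1 1 0 = (1, 1) := by rw [loopA, if_neg (by omega)]
    rw [if_neg hn]
    simp only [hA]
    rw [hx, hy]
    rfl
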